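-- pv_equiv track=rewrite | github.com/fhdufhdu/CodingTest | 프로그래머스/2/92342. 양궁대회/양궁대회.py | solution
-- ===== SOURCE A (Python) =====
-- from collections import deque
--
-- def compare(al, bl):
--     if not al:
--         return bl
--
--     for i in range(len(al) - 1, -1, -1):
--         if al[i] < bl[i]:
--             return bl
--         elif al[i] > bl[i]:
--             return al
--     return bl
--
-- def solution(n, info):
--     answer = []
--
--     queue = deque([(-1, [], n)])
--
--     histories = []
--     while queue:
--         prev_idx, prev_history, prev_remain_arrow = queue.pop()
--
--         curr_idx = prev_idx + 1
--         if curr_idx >= 11: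
--             prev_history[10] += prev_remain_arrow
--             histories.append(prev_history)
--             continue
--         queue.append((curr_idx, prev_history+[0], prev_remain_arrow))
--         if prev_remain_arrow-info[curr_idx] >= 0:
--             queue.append((curr_idx, prev_history+[info[curr_idx]], prev_remain_arrow-info[curr_idx]))
--         if prev_remain_arrow-(info[curr_idx]+1) >= 0:
--             queue.append((curr_idx, prev_history+[info[curr_idx]+1], prev_remain_arrow-(info[curr_idx]+1)))
--
--     total_max = 0
--     for history in histories:
--         appeach_total = 0
--         ryan_total = 0
--         for i in range(11):
--             if info[i] == 0 and history[i] == 0: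
--                 continue
--             if info[i] < history[i]:
--                 ryan_total += 10 - i
--             else:
--                 appeach_total += 10 - i
--
--         diff_total = ryan_total - appeach_total
--         if diff_total >= total_max:
--             if diff_total == total_max:
--                 answer = compare(answer, history)
--             else:
--                 answer = history
--             total_max = diff_total
--     if not answer or total_max == 0:
--         answer = [-1]
--     return answer
-- ===== SOURCE B (Python) =====
-- def solution(n, info):
--     # Enumerate the same choice set (0 / info[i] / info[i]+1 per target) by direct
--     # recursion over target indices instead of an explicit deque stack, trying the
--     # larger counts first, then pick the best history in one pass by a (score, reverse
--     # history) key instead of the compare-helper second pass.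
--     def gen(i, remain, hist):
--         if i >= 11:
--             return [hist[:10] + [hist[10] + remain]]
--         res = []
--         if remain - (info[i] + 1) >= 0:
--             res += gen(i + 1, remain - (info[i] + 1), hist + [info[i] + 1])
--         if remain - info[i] >= 0:
--             res += gen(i + 1, remain - info[i], hist + [info[i]])
--         res += gen(i + 1, remain, hist + [0])
--         return res
--
--     best = None
--     for h in gen(0, n, []):
--         d = 0
--         for i in range(11):
--             if info[i] != 0 or h[i] != 0:
--                 d += (10 - i) if info[i] < h[i] else -(10 - i)
--         key = (d, h[::-1])
--         if best is None or key > best[0]: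
--             best = (key, h)
--     return best[1] if best[0][0] > 0 else [-1]
-- ===== Notes on version B (the rewrite author's own statement) =====
-- stated objective: alternative
-- what changed: Replaced the explicit deque-stack DFS plus compare-helper second pass by direct recursion over target indices that builds the same histories, selected in one pass by maximising a (score, reversed-history) key.
import Mathlib
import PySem

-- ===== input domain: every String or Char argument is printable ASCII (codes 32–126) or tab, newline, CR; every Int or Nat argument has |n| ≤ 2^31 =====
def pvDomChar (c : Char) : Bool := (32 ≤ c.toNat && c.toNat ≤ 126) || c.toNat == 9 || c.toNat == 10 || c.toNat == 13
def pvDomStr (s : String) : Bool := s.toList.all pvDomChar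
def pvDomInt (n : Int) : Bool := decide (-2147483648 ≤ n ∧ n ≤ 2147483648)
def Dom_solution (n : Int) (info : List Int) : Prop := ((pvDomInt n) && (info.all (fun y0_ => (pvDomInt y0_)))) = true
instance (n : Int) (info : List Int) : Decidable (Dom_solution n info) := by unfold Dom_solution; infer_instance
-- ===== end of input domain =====

-- B replaces A's explicit deque-stack DFS by direct recursion over the target
-- indices and replaces the compare-helper selection pass by a one-pass maximum
-- under a (score, reversed history) key; objective: alternative decomposition.
-- A mutates only lists it freshly built inside the loop; neither version
-- mutates its arguments, so return-value equivalence is full equivalence.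

-- ===== PORT A =====

-- helper compare(al, bl): scan indices len(al)-1 .. 0, first difference decides
def pvCompareGo (al bl : List Int) : List Int → List Int
  | [] => bl
  | i :: rest =>
    -- al[i] / bl[i]; in every use both lists have equal length and i is in range,
    -- so the getD 0 default is never taken
    let a := (PySem.List.pyGet? al i).getD 0
    let b := (PySem.List.pyGet? bl i).getD 0
    if a < b then bl else if a > b then al else pvCompareGo al bl rest

def pvCompare (al bl : List Int) : List Int :=
  if al = [] then bl
  else pvCompareGo al bl (PySem.List.pyRange ((al.length : Int) - 1) (-1) (-1))

def pvWeight (idx : Int) : Nat := 4 ^ (12 - idx).toNat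

def pvQW (q : List (Int × List Int × Int)) : Nat := (q.map (fun e => pvWeight e.1)).sum

-- the while-queue loop; the deque is used as a stack (pop/append on the right),
-- encoded with the top of the stack at the HEAD of the list
-- histories.append(...) is encoded by consing and reversing once at the end
-- (the standard constant-time encoding of repeated right-append)
def pvLoopA (info : List Int) : List (Int × List Int × Int) → List (List Int) → List (List Int)
  | [], histories => histories.reverse
  | (prevIdx, prevHist, remain) :: rest, histories =>
    let currIdx := prevIdx + 1
    if currIdx ≥ 11 then
      -- prev_history[10] += prev_remain_arrow; history has length 11 here
      pvLoopA info rest ((prevHist.take 10 ++ [prevHist.getD 10 0 + remain]) :: histories)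
    else
      -- info[curr_idx]: in range under Pre_, so the getD 0 default is never taken
      let iv := (PySem.List.pyGet? info currIdx).getD 0
      let pushes := [(currIdx, prevHist ++ [0], remain)]
        ++ (if remain - iv ≥ 0 then [(currIdx, prevHist ++ [iv], remain - iv)] else [])
        ++ (if remain - (iv + 1) ≥ 0 then [(currIdx, prevHist ++ [iv + 1], remain - (iv + 1))] else [])
      pvLoopA info (pushes.reverse ++ rest) histories
  termination_by q _ => pvQW q
  decreasing_by
  · simp only [pvQW, List.map_cons, List.sum_cons]
    have : 0 < pvWeight prevIdx := Nat.pow_pos (by norm_num)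
    omega
  · have hp : prevIdx + 1 < 11 := by omega
    have h4 : pvWeight prevIdx = 4 * pvWeight (prevIdx + 1) := by
      have he : (12 - prevIdx).toNat = (12 - (prevIdx + 1)).toNat + 1 := by omega
      simp [pvWeight, he, pow_succ]; ring
    have hx : 0 < pvWeight (prevIdx + 1) := Nat.pow_pos (by norm_num)
    split_ifs <;>
      simp only [pvQW, List.map_append, List.sum_append, List.map_reverse, List.sum_reverse,
        List.map_cons, List.sum_cons, List.map_nil, List.sum_nil] <;>
      omega

-- inner scoring loop: for i in range(11), returning (appeach_total, ryan_total)
def pvStepA (info history : List Int) (st : Int × Int) (i : Int) : Int × Int :=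
  let ii := (PySem.List.pyGet? info i).getD 0
  let hh := (PySem.List.pyGet? history i).getD 0
  if ii = 0 ∧ hh = 0 then st
  else if ii < hh then (st.1, st.2 + (10 - i))
  else (st.1 + (10 - i), st.2)

def pvScoreA (info history : List Int) : Int × Int :=
  (PySem.List.pyRange 0 11 1).foldl (pvStepA info history) (0, 0)

-- outer selection loop: state (answer, total_max)
def pvStepSelA (info : List Int) (st : List Int × Int) (history : List Int) : List Int × Int :=
  let sc := pvScoreA info history
  let diff := sc.2 - sc.1
  if diff ≥ st.2 then
    (if diff = st.2 then pvCompare st.1 history else history, diff)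
  else st

def pvSelA (info : List Int) (hs : List (List Int)) : List Int × Int :=
  hs.foldl (pvStepSelA info) ([], 0)

def solution (n : Int) (info : List Int) : List Int :=
  let histories := pvLoopA info [(-1, [], n)] []
  let st := pvSelA info histories
  if st.1 = [] ∨ st.2 = 0 then [-1] else st.1

-- ===== PORT B =====

-- gen(i, remain, hist): recursion over target indices, larger counts first
def pvGenB (info : List Int) (i remain : Int) (hist : List Int) : List (List Int) :=
  if i ≥ 11 then [hist.take 10 ++ [hist.getD 10 0 + remain]]  -- hist[:10] + [hist[10] + remain]
  else
    let iv := (PySem.List.pyGet? info i).getD 0  -- info[i]: in range under Pre_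
    (if remain - (iv + 1) ≥ 0 then pvGenB info (i + 1) (remain - (iv + 1)) (hist ++ [iv + 1]) else [])
    ++ (if remain - iv ≥ 0 then pvGenB info (i + 1) (remain - iv) (hist ++ [iv]) else [])
    ++ pvGenB info (i + 1) remain (hist ++ [0])
  termination_by (11 - i).toNat
  decreasing_by all_goals omega

def pvStepB (info h : List Int) (d : Int) (i : Int) : Int :=
  let ii := (PySem.List.pyGet? info i).getD 0
  let hh := (PySem.List.pyGet? h i).getD 0
  if ii ≠ 0 ∨ hh ≠ 0 then d + (if ii < hh then 10 - i else -(10 - i)) else d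

def pvScoreB (info h : List Int) : Int :=
  (PySem.List.pyRange 0 11 1).foldl (pvStepB info h) 0

-- Python list comparison l2 < l1 (lexicographic)
def pvLexLt : List Int → List Int → Bool
  | _, [] => false
  | [], _ :: _ => true
  | x :: xs, y :: ys => if x < y then true else if y < x then false else pvLexLt xs ys

-- Python tuple comparison key > best[0] on (int, list) keys
def pvKeyGt (k1 k2 : Int × List Int) : Bool :=
  decide (k1.1 > k2.1) || (k1.1 == k2.1 && pvLexLt k2.2 k1.2)

def pvStepSelB (info : List Int) (best : Option ((Int × List Int) × List Int))
    (h : List Int) : Option ((Int × List Int) × List Int) :=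
  let k := (pvScoreB info h, h.reverse)
  match best with
  | none => some (k, h)
  | some b => if pvKeyGt k b.1 then some (k, h) else some b

def pvSelB (info : List Int) (hs : List (List Int)) : Option ((Int × List Int) × List Int) :=
  hs.foldl (pvStepSelB info) none

def solution_alt (n : Int) (info : List Int) : List Int :=
  match pvSelB info (pvGenB info 0 n []) with
  | some (k, h) => if k.1 > 0 then h else [-1]
  | none => [-1]

-- ===== PRECONDITION & SPEC =====
-- Pre_ excludes exactly the inputs where the Python A raises IndexError
-- (info shorter than 11 entries; both A and B index info[0..10]).
def Pre_solution (n : Int) (info : List Int) : Prop := 11 ≤ info.length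
instance (n : Int) (info : List Int) : Decidable (Pre_solution n info) := by
  unfold Pre_solution; infer_instance

def pvWitness_solution : Int × List Int := (5, [2, 1, 1, 1, 0, 0, 0, 0, 0, 0, 0])

def Spec_solution (n : Int) (info : List Int) (out : List Int) : Prop := out = solution_alt n info
instance (n : Int) (info : List Int) (out : List Int) : Decidable (Spec_solution n info out) := by
  unfold Spec_solution; infer_instance

-- ===== CLAIM (what is proved, stated in full; the proofs are below) =====
def Claim_equal_solution : Prop := ∀ (n : Int) (info : List Int), Dom_solution n info → Pre_solution n info → Spec_solution n info (solution n info)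

-- ===== LEMMAS AND PROOFS =====

theorem pvGo_spec (a b : List Int) (hl : a.length = b.length) :
    ∀ k : Nat, k ≤ a.length →
    pvCompareGo a b (PySem.List.pyRange ((k : Int) - 1) (-1) (-1)) =
      (if pvLexLt (a.take k).reverse (b.take k).reverse then b
       else if a.take k = b.take k then b else a) := by
  intro k
  induction k with
  | zero =>
    intro _
    rw [PySem.List.pyRange_neg_one_eq_nil (by norm_num)]
    simp [pvCompareGo, pvLexLt]
  | succ k ih =>
    intro hk
    have hka : k < a.length := hk
    have hkb : k < b.length := by omega
    have hcast : ((k + 1 : Nat) : Int) - 1 = (k : Int) := by push_cast; ring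
    rw [hcast, PySem.List.pyRange_neg_one_cons (by omega)]
    have hta : a.take (k + 1) = a.take k ++ [a[k]] := by
      rw [List.take_add_one]; simp [List.getElem?_eq_getElem hka]
    have htb : b.take (k + 1) = b.take k ++ [b[k]] := by
      rw [List.take_add_one]; simp [List.getElem?_eq_getElem hkb]
    have hga : (PySem.List.pyGet? a (k : Int)).getD 0 = a[k] := by
      simp [PySem.List.pyGet?_natCast, List.getElem?_eq_getElem hka]
    have hgb : (PySem.List.pyGet? b (k : Int)).getD 0 = b[k] := by
      simp [PySem.List.pyGet?_natCast, List.getElem?_eq_getElem hkb]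
    rw [hta, htb]
    simp only [pvCompareGo, hga, hgb, List.reverse_append, List.reverse_cons, List.reverse_nil,
      List.nil_append, List.cons_append, pvLexLt]
    rcases lt_trichotomy a[k] b[k] with hlt | heq | hgt
    · simp [hlt]
    · have hnl : ¬ a[k] < b[k] := by omega
      have hng : ¬ b[k] < a[k] := by omega
      simp only [heq, lt_irrefl, if_false, hnl, hng, gt_iff_lt, if_neg (lt_irrefl b[k])]
      rw [ih (by omega)]
      have hiff : (a.take k ++ [b[k]] = b.take k ++ [b[k]]) ↔ a.take k = b.take k :=
        List.append_left_inj _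
      simp only [hiff]
    · have hnl : ¬ a[k] < b[k] := by omega
      have hne2 : ¬ (a.take k ++ [a[k]] = b.take k ++ [b[k]]) := by
        intro hc
        have hlen : (a.take k).length = (b.take k).length := by
          simp [List.length_take]; omega
        have := List.append_inj_right hc hlen
        simp at this
        omega
      simp only [gt_iff_lt, if_neg hnl, if_pos hgt]
      simp only [if_neg hne2]
      simp

theorem pvCompare_nil (b : List Int) : pvCompare [] b = b := by simp [pvCompare]

theorem pvRev_if {α : Type} (c : Prop) [Decidable c] (e : α) :
    (if c then [e] else ([] : List α)).reverse = if c then [e] else [] := by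
  split_ifs <;> simp

theorem pvFlat_if {α β : Type} (c : Prop) [Decidable c] (e : α) (f : α → List β) :
    List.flatMap f (if c then [e] else []) = if c then f e else [] := by
  split_ifs <;> simp

-- A's stack loop flattens to B's recursive enumeration (same leaf order: the
-- stack pops last-pushed first, B recurses in that same order).
theorem pvLoopA_flat (info : List Int) (q : List (Int × List Int × Int)) (hs : List (List Int)) :
    pvLoopA info q hs = hs.reverse ++ q.flatMap (fun e => pvGenB info (e.1 + 1) e.2.2 e.2.1) := by
  induction q, hs using pvLoopA.induct info with
  | case1 hs => simp [pvLoopA]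
  | case2 prevIdx prevHist remain rest hs cI hge ih =>
    rw [pvLoopA]
    rw [if_pos (show prevIdx + 1 ≥ 11 from hge)]
    rw [ih]
    simp only [List.flatMap_cons, List.reverse_cons]
    rw [pvGenB]
    rw [if_pos (show prevIdx + 1 ≥ 11 from hge)]
    simp
  | case3 prevIdx prevHist remain rest hs cI hge iv pushes ih =>
    have hge' : ¬ prevIdx + 1 ≥ 11 := hge
    simp only [pvLoopA, if_neg hge']
    simp only [pushes, iv, cI, dite_eq_ite] at ih
    rw [ih]
    simp only [List.flatMap_cons]
    rw [pvGenB]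
    rw [if_neg hge']
    simp only [List.reverse_append, pvRev_if, List.reverse_cons, List.reverse_nil, List.nil_append, List.cons_append,
      List.append_assoc, List.flatMap_append, List.flatMap_cons, List.flatMap_nil, pvFlat_if,
      List.append_nil]

-- every history produced from a consistent state has length 11
theorem pvGenB_len (info : List Int) (i remain : Int) (hist : List Int) :
    i ≤ 11 → (hist.length : Int) = i → ∀ g ∈ pvGenB info i remain hist, g.length = 11 := by
  induction i, remain, hist using pvGenB.induct (info := info) with
  | case1 i remain hist hge =>
    intro h1 h2 g hg
    rw [pvGenB, if_pos hge] at hg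
    simp only [List.mem_singleton] at hg
    subst hg
    simp [List.length_take]
    omega
  | case2 i remain hist hge iv ih1 ih2 ih3 =>
    intro h1 h2 g hg
    rw [pvGenB, if_neg hge] at hg
    simp only [List.mem_append] at hg
    rcases hg with (hg | hg) | hg
    · by_cases hc : remain - ((PySem.List.pyGet? info i).getD 0 + 1) ≥ 0
      · rw [if_pos hc] at hg
        exact ih1 (by omega) (by simp; omega) g hg
      · rw [if_neg hc] at hg
        simp at hg
    · by_cases hc : remain - (PySem.List.pyGet? info i).getD 0 ≥ 0
      · rw [if_pos hc] at hg
        exact ih2 (by omega) (by simp; omega) g hg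
      · rw [if_neg hc] at hg
        simp at hg
    · exact ih3 (by omega) (by simp; omega) g hg

-- A's (ryan - appeach) difference is B's single accumulated score
theorem pvScore_aux (info h : List Int) (l : List Int) :
    ∀ (ap ry : Int),
    (l.foldl (pvStepA info h) (ap, ry)).2 - (l.foldl (pvStepA info h) (ap, ry)).1 =
      l.foldl (pvStepB info h) (ry - ap) := by
  induction l with
  | nil => intro ap ry; simp
  | cons i t ih =>
    intro ap ry
    have hstep : (pvStepA info h (ap, ry) i).2 - (pvStepA info h (ap, ry) i).1 =
        pvStepB info h (ry - ap) i := by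
      simp only [pvStepA, pvStepB]
      split_ifs <;> simp_all <;> omega
    have := ih (pvStepA info h (ap, ry) i).1 (pvStepA info h (ap, ry) i).2
    simp only [List.foldl_cons]
    rw [← hstep, ← this]

theorem pvScore_diff (info h : List Int) :
    (pvScoreA info h).2 - (pvScoreA info h).1 = pvScoreB info h := by
  have := pvScore_aux info h (PySem.List.pyRange 0 11 1) 0 0
  simpa [pvScoreA, pvScoreB] using this

-- compare picks the reverse-lexicographically larger list
theorem pvCompare_eq (a b : List Int) (hl : a.length = b.length) (hne : a ≠ []) :
    pvCompare a b = if pvLexLt a.reverse b.reverse then b else a := by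
  unfold pvCompare
  rw [if_neg hne]
  have h := pvGo_spec a b hl a.length le_rfl
  have htb : b.take a.length = b := by rw [hl, List.take_length]
  simp only [List.take_length, htb] at h
  rw [h]
  split_ifs <;> simp_all

-- invariant tying A's (answer, total_max) state to B's best option
def pvRel (info : List Int) (stA : List Int × Int) (stB : Option ((Int × List Int) × List Int)) : Prop :=
  match stB with
  | none => stA = ([], 0)
  | some ((d, rk), bh) =>
      rk = bh.reverse ∧ d = pvScoreB info bh ∧ bh.length = 11 ∧
      stA = (if 0 ≤ d then (bh, d) else ([], 0))

theorem pvStep_rel (info : List Int) (stA : List Int × Int)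
    (stB : Option ((Int × List Int) × List Int)) (h : List Int)
    (hlen : h.length = 11) (hrel : pvRel info stA stB) :
    pvRel info (pvStepSelA info stA h) (pvStepSelB info stB h) := by
  have hstep : ∀ (ans : List Int) (tm : Int), pvStepSelA info (ans, tm) h =
      if pvScoreB info h ≥ tm then
        (if pvScoreB info h = tm then pvCompare ans h else h, pvScoreB info h)
      else (ans, tm) := by
    intro ans tm
    simp only [pvStepSelA, pvScore_diff]
  cases stB with
  | none =>
    simp only [pvRel] at hrel
    rw [hrel, hstep]
    have hB : pvStepSelB info none h = some ((pvScoreB info h, h.reverse), h) := rfl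
    rw [hB]
    refine ⟨rfl, rfl, hlen, ?_⟩
    split_ifs <;> simp [pvCompare_nil] <;> omega
  | some b =>
    obtain ⟨⟨d, rk⟩, bh⟩ := b
    obtain ⟨hrk, hd, hbl, hstA⟩ := hrel
    subst hrk
    subst hd
    rw [hstA]
    have hne : bh ≠ [] := by intro hc; rw [hc] at hbl; simp at hbl
    have hcmp := pvCompare_eq bh h (by rw [hbl, hlen]) hne
    set sh := pvScoreB info h with hsh
    set sb := pvScoreB info bh with hsb
    have hB : pvStepSelB info (some ((sb, bh.reverse), bh)) h =
        (if pvKeyGt (sh, h.reverse) (sb, bh.reverse) then some ((sh, h.reverse), h)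
         else some ((sb, bh.reverse), bh)) := rfl
    rw [hB]
    have hkg : pvKeyGt (sh, h.reverse) (sb, bh.reverse) = true ↔
        (sb < sh ∨ (sh = sb ∧ pvLexLt bh.reverse h.reverse = true)) := by
      simp [pvKeyGt]
    by_cases hP : sb < sh ∨ (sh = sb ∧ pvLexLt bh.reverse h.reverse = true)
    · rw [if_pos (hkg.mpr hP)]
      refine ⟨rfl, rfl, hlen, ?_⟩
      by_cases h0 : 0 ≤ sb
      · rw [if_pos h0, hstep]
        rcases hP with hlt | ⟨heqd, hL⟩
        · rw [if_pos (by omega : sh ≥ sb), if_neg (by omega : ¬ sh = sb),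
            if_pos (by omega : (0:Int) ≤ sh)]
        · rw [if_pos (by omega : sh ≥ sb), if_pos heqd, hcmp, if_pos hL,
            if_pos (by omega : (0:Int) ≤ sh)]
      · rw [if_neg h0, hstep]
        by_cases hsh0 : (0:Int) ≤ sh
        · rw [if_pos (by omega : sh ≥ (0:Int))]
          by_cases hz : sh = (0:Int)
          · rw [if_pos hz, pvCompare_nil, if_pos hsh0]
          · rw [if_neg hz, if_pos hsh0]
        · rw [if_neg (by omega : ¬ sh ≥ (0:Int)), if_neg hsh0]
    · rw [if_neg (fun hc => hP (hkg.mp hc))]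
      refine ⟨rfl, rfl, hbl, ?_⟩
      push_neg at hP
      obtain ⟨h1, h2⟩ := hP
      by_cases h0 : 0 ≤ sb
      · rw [if_pos h0, hstep]
        by_cases heq2 : sh = sb
        · rw [if_pos (by omega : sh ≥ sb), if_pos heq2, hcmp, if_neg (h2 heq2), heq2]
        · rw [if_neg (by omega : ¬ sh ≥ sb)]
      · rw [if_neg h0, hstep]
        have hle : sh ≤ sb := h1
        rw [if_neg (by omega : ¬ sh ≥ (0:Int))]

theorem pvFold_rel (info : List Int) (hs : List (List Int))
    (hlen : ∀ h ∈ hs, h.length = 11) (stA : List Int × Int)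
    (stB : Option ((Int × List Int) × List Int)) (hrel : pvRel info stA stB) :
    pvRel info (hs.foldl (pvStepSelA info) stA) (hs.foldl (pvStepSelB info) stB) := by
  induction hs generalizing stA stB with
  | nil => exact hrel
  | cons h t ih =>
    exact ih (fun g hg => hlen g (List.mem_cons_of_mem _ hg)) _ _
      (pvStep_rel info stA stB h (hlen h List.mem_cons_self) hrel)

theorem pvMain (n : Int) (info : List Int) : solution n info = solution_alt n info := by
  unfold solution solution_alt
  rw [pvLoopA_flat]
  simp only [List.flatMap_cons, List.flatMap_nil, List.append_nil, List.nil_append,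
    List.reverse_nil]
  rw [show ((-1 : Int) + 1) = 0 by decide]
  have hlen : ∀ g ∈ pvGenB info 0 n [], g.length = 11 :=
    pvGenB_len info 0 n [] (by norm_num) (by simp)
  have hrel : pvRel info (pvSelA info (pvGenB info 0 n []))
      (pvSelB info (pvGenB info 0 n [])) :=
    pvFold_rel info (pvGenB info 0 n []) hlen ([], 0) none rfl
  rcases hB : pvSelB info (pvGenB info 0 n []) with _ | ⟨⟨d, rk⟩, bh⟩
  · rw [hB] at hrel
    simp only [pvRel] at hrel
    rw [hrel]
    simp
  · rw [hB] at hrel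
    simp only [pvRel] at hrel
    obtain ⟨hrk, hd, hbl, hstA⟩ := hrel
    have hne : bh ≠ [] := by intro hc; rw [hc] at hbl; simp at hbl
    rcases lt_trichotomy d 0 with hd0 | hd0 | hd0
    · rw [if_neg (by omega)] at hstA
      rw [hstA]
      simp [show ¬ (0:Int) < d by omega]
    · rw [if_pos (by omega)] at hstA
      rw [hstA, hd0]
      simp
    · rw [if_pos (by omega)] at hstA
      rw [hstA]
      simp [hne, show ¬ d = 0 by omega, hd0]

-- ===== VERDICT (by name: the statement is the Claim_ definition above) =====
theorem solution_spec : Claim_equal_solution := by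
  intro n info _ _
  unfold Spec_solution
  exact pvMain n info
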